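-- pv_equiv track=rewrite | github.com/fyonkman/word-frequency | model.py | stem
-- ===== SOURCE A (Python) =====
-- SUFFIXES = ("ing", "ed", "s")
--
-- def stem(word):
--     stemmed=word
--     for suffix in SUFFIXES:
--         if word.endswith(suffix) and not word[:-len(suffix)].endswith(suffix):
--             stemmed=word[:-len(suffix)]
--             while stemmed.endswith('i') or stemmed.endswith('e'):
--                 if stemmed.endswith('i'): stemmed = stemmed[:-1]+'y'
--                 else: stemmed=stemmed[:-1]
--     return stemmed
-- ===== SOURCE B (Python) =====
-- SUFFIXES = ("ing", "ed", "s")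
--
-- def stem(word):
--     for suffix in SUFFIXES:
--         if word.endswith(suffix) and not word[:-len(suffix)].endswith(suffix):
--             base = word[:-len(suffix)].rstrip('e')
--             if base.endswith('i'):
--                 base = base[:-1] + 'y'
--             return base
--     return word
-- ===== Notes on version B (the rewrite author's own statement) =====
-- stated objective: simpler
-- what changed: B returns early from the suffix loop (valid because the three suffixes are mutually exclusive) and replaces A's interleaved while-loop over the trailing characters by two separate phases: a builtin strip of the trailing e-characters followed by a single one-shot i-to-y replacement.
import Mathlib
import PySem

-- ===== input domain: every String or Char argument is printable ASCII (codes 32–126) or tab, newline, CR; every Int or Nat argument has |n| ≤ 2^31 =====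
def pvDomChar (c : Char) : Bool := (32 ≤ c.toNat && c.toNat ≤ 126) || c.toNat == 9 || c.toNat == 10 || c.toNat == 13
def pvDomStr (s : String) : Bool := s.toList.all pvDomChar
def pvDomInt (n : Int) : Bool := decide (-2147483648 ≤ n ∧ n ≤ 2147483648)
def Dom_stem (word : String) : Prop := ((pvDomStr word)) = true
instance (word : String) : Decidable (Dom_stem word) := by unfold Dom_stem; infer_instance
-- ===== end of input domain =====

-- B returns early from the suffix loop (the three suffixes are mutually
-- exclusive) and separates A's interleaved while-loop into a builtin strip of
-- trailing e-characters followed by a one-shot i-to-y replacement; same value, same cost.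

-- ===== PORT A =====

-- cited by name in stemLoop's decreasing_by: ending in the single character c'
-- after appending c is exactly c' = c
theorem ew_concat (t : List Char) (c c' : Char) :
    PySem.Chars.endswith (t ++ [c]) [c'] = (c' == c) := by
  by_cases h : c' = c
  · subst h; simp [PySem.Chars.endswith_iff]
  · have hns : ¬ ([c'] <:+ t ++ [c]) := by
      rintro ⟨u, hu⟩
      have := congrArg List.getLast? hu
      simp at this
      exact h this
    have h2 : PySem.Chars.endswith (t ++ [c]) [c'] = false := by
      rw [← Bool.not_eq_true]
      exact fun hx => hns ((PySem.Chars.endswith_iff _ _).1 hx)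
    rw [h2]
    simp [h]

-- the 'while stemmed.endswith('i') or stemmed.endswith('e')' loop of A
def stemLoop (cs : List Char) : List Char :=
  if PySem.Chars.endswith cs ['i'] = true ∨ PySem.Chars.endswith cs ['e'] = true then
    if PySem.Chars.endswith cs ['i'] = true then
      stemLoop (PySem.List.slice cs none (some (-1)) ++ ['y'])
    else
      stemLoop (PySem.List.slice cs none (some (-1)))
  else cs
termination_by 2 * cs.length + (if PySem.Chars.endswith cs ['i'] = true then 1 else 0)
decreasing_by
  · -- i-branch: same length, but the new word ends in 'y', so the indicator drops
    rcases (PySem.Chars.endswith_iff cs ['i']).1 (by assumption) with ⟨t, ht⟩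
    subst ht
    simp only [PySem.List.slice_to_neg_one, List.dropLast_concat, ew_concat,
      List.length_append, List.length_singleton]
    simp
  · -- e-branch: the word is nonempty and loses its last character
    rename_i h hni
    rcases h with h | h
    · exact absurd h hni
    · rcases (PySem.Chars.endswith_iff cs ['e']).1 h with ⟨t, ht⟩
      subst ht
      simp only [PySem.List.slice_to_neg_one, List.dropLast_concat, ew_concat,
        List.length_append, List.length_singleton]
      split <;> split <;> omega

def stem (word : String) : String :=
  let cs := word.toList
  String.ofList (([['i','n','g'], ['e','d'], ['s']].foldl
    (fun stemmed suf =>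
      if PySem.Chars.endswith cs suf = true ∧
         ¬ (PySem.Chars.endswith (PySem.List.slice cs none (some (-(suf.length : Int)))) suf = true) then
        stemLoop (PySem.List.slice cs none (some (-(suf.length : Int))))
      else stemmed) cs))

-- ===== PORT B =====

-- B's normalization: strip trailing e-characters, then one-shot i-to-y
-- (the rstrip builtin ported as dropWhile on the reversed list; exact here)
def altNormalize (b : List Char) : List Char :=
  let base := (b.reverse.dropWhile (· == 'e')).reverse
  if PySem.Chars.endswith base ['i'] = true then base.dropLast ++ ['y'] else base

-- the 'for suffix in SUFFIXES' loop with its early return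
def altFind (cs : List Char) : List (List Char) → List Char
  | [] => cs
  | suf :: rest =>
    if PySem.Chars.endswith cs suf = true ∧
       ¬ (PySem.Chars.endswith (PySem.List.slice cs none (some (-(suf.length : Int)))) suf = true) then
      altNormalize (PySem.List.slice cs none (some (-(suf.length : Int))))
    else altFind cs rest

def stem_alt (word : String) : String :=
  String.ofList (altFind word.toList [['i','n','g'], ['e','d'], ['s']])

-- ===== PRECONDITION & SPEC =====
def Spec_stem (word : String) (out : String) : Prop := out = stem_alt word
instance (word : String) (out : String) : Decidable (Spec_stem word out) := by unfold Spec_stem; infer_instance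

-- ===== CLAIM (what is proved, stated in full; the proofs are below) =====
def Claim_equal_stem : Prop := ∀ (word : String), Dom_stem word → Spec_stem word (stem word)

-- ===== LEMMAS AND PROOFS =====

-- A's while loop computes exactly B's two-phase normalization
theorem stemLoop_eq_altNormalize (cs : List Char) : stemLoop cs = altNormalize cs := by
  induction cs using stemLoop.induct with
  | case1 cs h hi ih =>
    rcases (PySem.Chars.endswith_iff cs ['i']).1 hi with ⟨t, ht⟩
    subst ht
    have hy : ¬ (PySem.Chars.endswith (t ++ ['y']) ['i'] = true ∨
        PySem.Chars.endswith (t ++ ['y']) ['e'] = true) := by simp [ew_concat]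
    rw [stemLoop.eq_def, if_pos h, if_pos hi, PySem.List.slice_to_neg_one,
      List.dropLast_concat, stemLoop.eq_def, if_neg hy]
    simp [altNormalize, hi]
  | case2 cs h hi ih =>
    have he : PySem.Chars.endswith cs ['e'] = true := by
      rcases h with h | h
      · exact absurd h hi
      · exact h
    rcases (PySem.Chars.endswith_iff cs ['e']).1 he with ⟨t, ht⟩
    subst ht
    rw [stemLoop.eq_def, if_pos h, if_neg hi]
    rw [PySem.List.slice_to_neg_one, List.dropLast_concat] at ih ⊢
    rw [ih]
    simp [altNormalize]
  | case3 cs h =>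
    obtain ⟨hi, he⟩ := not_or.mp h
    rw [stemLoop.eq_def, if_neg h]
    simp only [Bool.not_eq_true] at hi he
    rcases List.eq_nil_or_concat cs with rfl | ⟨t, c, rfl⟩
    · simp [altNormalize, PySem.Chars.endswith_iff]
    · simp only [List.concat_eq_append] at hi he ⊢
      rw [ew_concat] at hi he
      have hce : (c == 'e') = false := by
        simp only [beq_eq_false_iff_ne, ne_eq] at he ⊢
        exact fun hx => he hx.symm
      simp [altNormalize, hce, ew_concat, hi]

-- a word ending in a suffix whose last character is c itself ends in c
theorem last_of_ew (cs l : List Char) (c : Char)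
    (h : PySem.Chars.endswith cs (l ++ [c]) = true) : ∃ t, cs = t ++ [c] := by
  rcases (PySem.Chars.endswith_iff cs (l ++ [c])).1 h with ⟨t, ht⟩
  exact ⟨t ++ l, by simp [← ht]⟩

-- ===== VERDICT (by name: the statement is the Claim_ definition above) =====
theorem stem_spec : Claim_equal_stem := by
  intro word _
  unfold Spec_stem stem stem_alt
  simp only [List.foldl, altFind]
  generalize word.toList = cs
  by_cases h1 : PySem.Chars.endswith cs ['i','n','g'] = true ∧
      ¬ (PySem.Chars.endswith (PySem.List.slice cs none (some (-(([('i' : Char),'n','g']).length : Int)))) ['i','n','g'] = true)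
  · rcases last_of_ew cs ['i','n'] 'g' h1.1 with ⟨t, rfl⟩
    have hd : PySem.Chars.endswith (t ++ ['g']) ['e','d'] = false := by
      by_contra hx
      rw [Bool.not_eq_false] at hx
      rcases last_of_ew _ ['e'] 'd' hx with ⟨u, hu⟩
      have := congrArg List.getLast? hu
      simp at this
    have hs : PySem.Chars.endswith (t ++ ['g']) ['s'] = false := by simp [ew_concat]
    rw [if_pos h1, if_pos h1]
    simp [hd, hs, stemLoop_eq_altNormalize]
  · rw [if_neg h1, if_neg h1]
    by_cases h2 : PySem.Chars.endswith cs ['e','d'] = true ∧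
        ¬ (PySem.Chars.endswith (PySem.List.slice cs none (some (-(([('e' : Char),'d']).length : Int)))) ['e','d'] = true)
    · rcases last_of_ew cs ['e'] 'd' h2.1 with ⟨t, rfl⟩
      have hs : PySem.Chars.endswith (t ++ ['d']) ['s'] = false := by simp [ew_concat]
      rw [if_pos h2, if_pos h2]
      simp [hs, stemLoop_eq_altNormalize]
    · rw [if_neg h2, if_neg h2]
      by_cases h3 : PySem.Chars.endswith cs ['s'] = true ∧
          ¬ (PySem.Chars.endswith (PySem.List.slice cs none (some (-(([('s' : Char)]).length : Int)))) ['s'] = true)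
      · rw [if_pos h3, if_pos h3, stemLoop_eq_altNormalize]
      · rw [if_neg h3, if_neg h3]
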